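-- pv_equiv track=rewrite | github.com/soongenwong/coding-practice | Interview questions/goldman.py | minChairs
-- ===== SOURCE A (Python) =====
-- def minChairs(simulations):
--     """
--     Calculate the minimum number of chairs required for each simulation.
--
--     Args:
--         simulations: A list of strings, where each string contains actions 'C', 'U', 'R', or 'L'
--
--     Returns:
--         A list of integers representing the minimum chairs required for each simulation
--     """
--     results = []
--
--     for simulation in simulations:
--         available_chairs = 0  # Chairs not currently in use
--         total_chairs = 0      # Total chairs purchased
--
--         for action in simulation:
--             if action == 'C' or action == 'U':
--                 # Employee needs a chair
--                 if available_chairs > 0: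
--                     # Use an available chair
--                     available_chairs -= 1
--                 else:
--                     # No chairs available, buy a new one
--                     total_chairs += 1
--             elif action == 'R' or action == 'L':
--                 # Employee leaves, chair becomes available
--                 available_chairs += 1
--
--         results.append(total_chairs)
--
--     return results
-- ===== SOURCE B (Python) =====
-- def _peak_occupancy(simulation):
--     # max prefix sum of +1/-1 deltas, computed right-to-left:
--     # m(suffix) = max(0, delta(head) + m(rest))
--     m = 0
--     for c in reversed(simulation):
--         d = 1 if c in 'CU' else (-1 if c in 'RL' else 0)
--         m = d + m
--         if m < 0:
--             m = 0
--     return m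
--
-- def minChairs(simulations):
--     return [_peak_occupancy(s) for s in simulations]
-- ===== Notes on version B (the rewrite author's own statement) =====
-- stated objective: alternative
-- what changed: Replaces A's available-pool/total-purchased accumulator scan with a per-simulation max-prefix-sum computed by a right-to-left fold (m = max(0, delta + m)), mapped over the list instead of appended in a fold.
import Mathlib
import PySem

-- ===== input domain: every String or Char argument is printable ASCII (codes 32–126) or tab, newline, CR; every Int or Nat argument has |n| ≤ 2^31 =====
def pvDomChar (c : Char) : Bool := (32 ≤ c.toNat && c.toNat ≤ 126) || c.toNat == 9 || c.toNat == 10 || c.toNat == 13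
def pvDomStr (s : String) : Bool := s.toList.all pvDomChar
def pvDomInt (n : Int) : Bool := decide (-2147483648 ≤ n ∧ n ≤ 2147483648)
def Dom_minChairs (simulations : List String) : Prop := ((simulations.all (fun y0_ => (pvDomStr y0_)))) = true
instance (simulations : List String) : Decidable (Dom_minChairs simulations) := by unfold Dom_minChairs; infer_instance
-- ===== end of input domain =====

-- B replaces A's available/total chair-pool scan with a right-to-left max-prefix-sum fold mapped over the list (alternative decomposition, same cost).

-- ===== PORT A =====
-- state: (available_chairs, total_chairs)
def minChairsStepA (st : Int × Int) (action : Char) : Int × Int :=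
  if action = 'C' ∨ action = 'U' then
    if st.1 > 0 then (st.1 - 1, st.2) else (st.1, st.2 + 1)
  else if action = 'R' ∨ action = 'L' then
    (st.1 + 1, st.2)
  else st

def minChairs (simulations : List String) : List Int :=
  simulations.foldl (fun results simulation =>
    results ++ [(simulation.toList.foldl minChairsStepA (0, 0)).2]) []

-- ===== PORT B =====
-- Source B's right-to-left loop over the string is this foldr; m = max 0 (delta + m)
def peakOccupancy (simulation : String) : Int :=
  simulation.toList.foldr
    (fun c m =>
      max 0 ((if c = 'C' ∨ c = 'U' then (1 : Int) else if c = 'R' ∨ c = 'L' then -1 else 0) + m)) 0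

def minChairs_alt (simulations : List String) : List Int :=
  simulations.map peakOccupancy

-- ===== PRECONDITION & SPEC =====
def Spec_minChairs (simulations : List String) (out : List Int) : Prop := out = minChairs_alt simulations
instance (simulations : List String) (out : List Int) : Decidable (Spec_minChairs simulations out) := by unfold Spec_minChairs; infer_instance

-- ===== CLAIM (what is proved, stated in full; the proofs are below) =====
def Claim_equal_minChairs : Prop := ∀ (simulations : List String), Dom_minChairs simulations → Spec_minChairs simulations (minChairs simulations)

-- ===== LEMMAS AND PROOFS =====

-- peakOccupancy's fold is nonnegative
theorem peak_nonneg (cs : List Char) :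
    0 ≤ cs.foldr (fun c m =>
      max 0 ((if c = 'C' ∨ c = 'U' then (1 : Int) else if c = 'R' ∨ c = 'L' then -1 else 0) + m)) 0 := by
  cases cs with
  | nil => simp
  | cons c cs => simp

-- A's per-simulation fold, from a general state, equals total + max(0, maxPrefix - avail)
theorem minChairs_fold_eq (cs : List Char) (avail total : Int) (h : 0 ≤ avail) :
    (cs.foldl minChairsStepA (avail, total)).2 =
      total + max 0 ((cs.foldr (fun c m =>
        max 0 ((if c = 'C' ∨ c = 'U' then (1 : Int) else if c = 'R' ∨ c = 'L' then -1 else 0) + m)) 0) - avail) := by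
  induction cs generalizing avail total with
  | nil => simp [h]
  | cons c cs ih =>
    have hM := peak_nonneg cs
    simp only [List.foldl_cons, List.foldr_cons, minChairsStepA]
    by_cases hc : c = 'C' ∨ c = 'U'
    · rw [if_pos hc, if_pos hc]
      by_cases ha : avail > 0
      · rw [if_pos ha, ih _ _ (by omega)]
        omega
      · rw [if_neg ha, ih _ _ h]
        omega
    · rw [if_neg hc, if_neg hc]
      by_cases hr : c = 'R' ∨ c = 'L'
      · rw [if_pos hr, if_pos hr, ih _ _ (by omega)]
        omega
      · rw [if_neg hr, if_neg hr, ih _ _ h]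
        omega

-- A's outer foldl-with-append produces the map of the per-simulation result
theorem minChairs_foldl_append (l : List String) (acc : List Int) :
    l.foldl (fun results simulation =>
      results ++ [(simulation.toList.foldl minChairsStepA (0, 0)).2]) acc =
    acc ++ l.map (fun s => (s.toList.foldl minChairsStepA (0, 0)).2) := by
  induction l generalizing acc with
  | nil => simp
  | cons s l ih => simp [ih]

-- ===== VERDICT (by name: the statement is the Claim_ definition above) =====
theorem minChairs_spec : Claim_equal_minChairs := by
  intro simulations _
  unfold Spec_minChairs minChairs minChairs_alt
  rw [minChairs_foldl_append]
  simp only [List.nil_append]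
  refine List.map_congr_left (fun s _ => ?_)
  rw [minChairs_fold_eq s.toList 0 0 le_rfl]
  have := peak_nonneg s.toList
  unfold peakOccupancy
  omega
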